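-- pv_equiv track=rewrite | github.com/alicelond/coding_problems | logic/basic/naive_closest_number.py | closest_number
-- ===== SOURCE A (Python) =====
-- def closest_number(n, m):
--     if (m == 0):
--         raise ValueError("m cannot be zero")
--
--     # Checks if n is divisible by m
--     if (n % m == 0):
--         return n
--     right_number = n + 1
--     left_number = n - 1
--
--     # Checks for the closest number on the right side of n which is divisible by m
--     while (right_number % m != 0):
--         right_number += 1
--
--     # Checks for the closest number on the left side of n which is divisible by m
--     while (left_number % m != 0):
--         left_number -= 1
--
--     distance_right = right_number - n
--     distance_left = n - left_number
--
--     if (distance_right == distance_left):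
--         # We use key=abs so that max compares values using their absolute values
--         return max(left_number, right_number, key=abs)
--     elif (distance_left < distance_right):
--         return left_number
--     else:
--         return right_number
-- ===== SOURCE B (Python) =====
-- def closest_number(n, m):
--     if m == 0:
--         raise ValueError("m cannot be zero")
--     k = abs(m)
--     r = n % k
--     if r == 0:
--         return n
--     left = n - r
--     right = left + k
--     if 2 * r < k:
--         return left
--     if 2 * r > k:
--         return right
--     # exact tie: pick the one with larger absolute value (A's max key=abs, first wins on tie)
--     return left if abs(left) >= abs(right) else right
-- ===== Notes on version B (the rewrite author's own statement) =====
-- stated objective: faster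
-- what changed: Replaces A's two step-by-step while-loop scans for the neighbouring multiples of m with a direct O(1) computation of both via n % abs(m), keeping A's exact tie-break (larger absolute value, left on abs-tie).
import Mathlib
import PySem

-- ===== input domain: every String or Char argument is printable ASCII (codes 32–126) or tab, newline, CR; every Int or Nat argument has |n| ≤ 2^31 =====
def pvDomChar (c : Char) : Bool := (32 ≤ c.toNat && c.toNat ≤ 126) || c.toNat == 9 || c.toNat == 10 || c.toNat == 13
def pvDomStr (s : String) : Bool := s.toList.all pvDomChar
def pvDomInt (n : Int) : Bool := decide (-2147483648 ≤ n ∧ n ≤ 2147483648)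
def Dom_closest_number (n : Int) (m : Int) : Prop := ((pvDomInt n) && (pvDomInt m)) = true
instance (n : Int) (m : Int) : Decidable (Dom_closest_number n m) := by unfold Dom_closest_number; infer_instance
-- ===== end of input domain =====

-- B replaces A's two O(m) linear scans for the neighbouring multiples with an O(1)
-- computation via n % |m|; same value everywhere A returns (Pre_ excludes m = 0, where A raises).


-- ===== PORT A =====
-- the 'while right % m != 0: right += 1' loop; fuel |m| suffices since among any |m|
-- consecutive integers one is a multiple of m (Pre_ has m ≠ 0)
def pvFindUp (m : Int) : Nat → Int → Int
  | 0, x => x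
  | f + 1, x => if PySem.Int.mod x m ≠ 0 then pvFindUp m f (x + 1) else x

-- the 'while left % m != 0: left -= 1' loop
def pvFindDown (m : Int) : Nat → Int → Int
  | 0, x => x
  | f + 1, x => if PySem.Int.mod x m ≠ 0 then pvFindDown m f (x - 1) else x

def closest_number (n : Int) (m : Int) : Int :=
  if PySem.Int.mod n m = 0 then n
  else
    let right_number := pvFindUp m m.natAbs (n + 1)
    let left_number := pvFindDown m m.natAbs (n - 1)
    let distance_right := right_number - n
    let distance_left := n - left_number
    if distance_right = distance_left then
      -- max(left_number, right_number, key=abs): right wins only with strictly larger |·|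
      if right_number.natAbs > left_number.natAbs then right_number else left_number
    else if distance_left < distance_right then left_number
    else right_number

-- ===== PORT B =====
def closest_number_alt (n : Int) (m : Int) : Int :=
  let k := |m|
  let r := PySem.Int.mod n k
  if r = 0 then n
  else
    let left := n - r
    let right := left + k
    if 2 * r < k then left
    else if 2 * r > k then right
    else if left.natAbs ≥ right.natAbs then left else right

-- ===== PRECONDITION & SPEC =====
-- Pre_ excludes exactly m = 0, where A raises ValueError.
def Pre_closest_number (n : Int) (m : Int) : Prop := m ≠ 0
instance (n : Int) (m : Int) : Decidable (Pre_closest_number n m) := by unfold Pre_closest_number; infer_instance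
def pvWitness_closest_number : Int × Int := (7, 3)

def Spec_closest_number (n : Int) (m : Int) (out : Int) : Prop := out = closest_number_alt n m
instance (n : Int) (m : Int) (out : Int) : Decidable (Spec_closest_number n m out) := by unfold Spec_closest_number; infer_instance

-- ===== CLAIM (what is proved, stated in full; the proofs are below) =====
def Claim_equal_closest_number : Prop := ∀ (n : Int) (m : Int), Dom_closest_number n m → Pre_closest_number n m → Spec_closest_number n m (closest_number n m)

-- ===== LEMMAS AND PROOFS =====

lemma pvFindUp_eq (m : Int) (f : Nat) : ∀ (x : Int) (d : Nat), d ≤ f →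
    PySem.Int.mod (x + d) m = 0 → (∀ j : Nat, j < d → PySem.Int.mod (x + j) m ≠ 0) →
    pvFindUp m f x = x + d := by
  induction f with
  | zero =>
    intro x d hd h0 _
    have : d = 0 := Nat.le_zero.mp hd
    subst this; simp [pvFindUp]
  | succ f ih =>
    intro x d hd h0 hlt
    by_cases hx : PySem.Int.mod x m = 0
    · have hd0 : d = 0 := by
        by_contra h
        have := hlt 0 (by omega)
        simp at this
        exact this hx
      subst hd0; simp [pvFindUp, hx]
    · have hd0 : d ≠ 0 := by
        intro h; subst h; simp at h0; exact hx h0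
      obtain ⟨d', rfl⟩ : ∃ d', d = d' + 1 := ⟨d - 1, by omega⟩
      have step : pvFindUp m (f + 1) x = pvFindUp m f (x + 1) := by
        simp [pvFindUp, hx]
      rw [step, ih (x + 1) d' (by omega)
        (by have : (x + 1) + (d' : Int) = x + ((d' : Nat) + 1 : Nat) := by push_cast; ring
            rw [this]; exact h0)
        (by intro j hj h
            have : (x + 1) + (j : Int) = x + ((j + 1 : Nat) : Int) := by push_cast; ring
            rw [this] at h
            exact hlt (j + 1) (by omega) h)]
      push_cast; ring

lemma pvFindDown_eq (m : Int) (f : Nat) : ∀ (x : Int) (d : Nat), d ≤ f →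
    PySem.Int.mod (x - d) m = 0 → (∀ j : Nat, j < d → PySem.Int.mod (x - j) m ≠ 0) →
    pvFindDown m f x = x - d := by
  induction f with
  | zero =>
    intro x d hd h0 _
    have : d = 0 := Nat.le_zero.mp hd
    subst this; simp [pvFindDown]
  | succ f ih =>
    intro x d hd h0 hlt
    by_cases hx : PySem.Int.mod x m = 0
    · have hd0 : d = 0 := by
        by_contra h
        have := hlt 0 (by omega)
        simp at this
        exact this hx
      subst hd0; simp [pvFindDown, hx]
    · have hd0 : d ≠ 0 := by
        intro h; subst h; simp at h0; exact hx h0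
      obtain ⟨d', rfl⟩ : ∃ d', d = d' + 1 := ⟨d - 1, by omega⟩
      have step : pvFindDown m (f + 1) x = pvFindDown m f (x - 1) := by
        simp [pvFindDown, hx]
      rw [step, ih (x - 1) d' (by omega)
        (by have : (x - 1) - (d' : Int) = x - ((d' : Nat) + 1 : Nat) := by push_cast; ring
            rw [this]; exact h0)
        (by intro j hj h
            have : (x - 1) - (j : Int) = x - ((j + 1 : Nat) : Int) := by push_cast; ring
            rw [this] at h
            exact hlt (j + 1) (by omega) h)]
      push_cast; ring

-- ===== VERDICT (by name: the statement is the Claim_ definition above) =====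
theorem closest_number_spec : Claim_equal_closest_number := by
  intro n m _ hm
  show closest_number n m = closest_number_alt n m
  have hm : m ≠ 0 := hm
  set k : Int := (m.natAbs : Int) with hk
  have hkpos : 0 < k := by
    have := Int.natAbs_pos.mpr hm; omega
  have habs : |m| = k := Int.abs_eq_natAbs m
  have hdvd : ∀ a : Int, (PySem.Int.mod a m = 0) ↔ k ∣ a := fun a => by
    rw [PySem.Int.mod_eq_zero_iff_dvd]
    exact ⟨fun h => Int.natAbs_dvd.mpr h, fun h => Int.natAbs_dvd.mp h⟩
  set r : Int := n % k with hr
  have hr0 : 0 ≤ r := Int.emod_nonneg n (by omega)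
  have hrk : r < k := Int.emod_lt_of_pos n hkpos
  have hmodk : PySem.Int.mod n k = r := PySem.Int.mod_eq_emod_of_pos hkpos
  have hsub : k ∣ (n - r) := ⟨n / k, by have := Int.emod_add_mul_ediv n k; linarith⟩
  by_cases hzero : r = 0
  · have hA : PySem.Int.mod n m = 0 := (hdvd n).mpr (by
      have : n - r = n := by omega
      rw [← this]; exact hsub)
    simp [closest_number, closest_number_alt, hA, habs, hmodk, hzero]
  · have hA : PySem.Int.mod n m ≠ 0 := by
      intro h
      rw [hdvd] at h
      have h3 := dvd_sub h hsub
      have he : n - (n - r) = r := by ring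
      rw [he] at h3
      have := Int.le_of_dvd (by omega) h3
      omega
    -- right_number
    have hright : pvFindUp m m.natAbs (n + 1) = n - r + k := by
      have hd1 : ((k - r - 1).toNat : Int) = k - r - 1 := by omega
      have := pvFindUp_eq m m.natAbs (n + 1) (k - r - 1).toNat (by omega)
        (by rw [hd1]
            have he : (n + 1) + (k - r - 1) = (n - r) + k := by ring
            rw [he, hdvd]
            exact dvd_add hsub dvd_rfl)
        (by intro j hj h
            rw [hdvd] at h
            have hj' : (j : Int) < k - r - 1 := by omega
            have : k ∣ (n + 1 + j) - (n - r) := dvd_sub h hsub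
            have h2 : (n + 1 + (j : Int)) - (n - r) = r + 1 + j := by ring
            rw [h2] at this
            have := Int.le_of_dvd (by omega) this
            omega)
      rw [this, hd1]; ring
    -- left_number
    have hleft : pvFindDown m m.natAbs (n - 1) = n - r := by
      have hd1 : ((r - 1).toNat : Int) = r - 1 := by omega
      have := pvFindDown_eq m m.natAbs (n - 1) (r - 1).toNat (by omega)
        (by rw [hd1]
            have he : (n - 1) - (r - 1) = n - r := by ring
            rw [he, hdvd]
            exact hsub)
        (by intro j hj h
            rw [hdvd] at h
            have hj' : (j : Int) < r - 1 := by omega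
            have : k ∣ (n - r) - (n - 1 - j) := dvd_sub hsub h
            have h2 : (n - r) - (n - 1 - (j : Int)) = -r + 1 + j := by ring
            rw [h2] at this
            have : k ∣ r - 1 - j := by
              have := (dvd_neg).mpr this
              have h3 : -(-r + 1 + (j : Int)) = r - 1 - j := by ring
              rwa [h3] at this
            have := Int.le_of_dvd (by omega) this
            omega)
      rw [this, hd1]; ring
    simp only [closest_number, closest_number_alt, hA, habs, hmodk,
      if_neg hzero, hright, hleft]
    have e1 : n - r + k - n = k - r := by ring
    have e2 : n - (n - r) = r := by ring
    rw [e1, e2]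
    rw [if_neg not_false]
    by_cases hlt : 2 * r < k
    · rw [if_neg (show ¬(k - r = r) by omega), if_pos (show r < k - r by omega),
          if_pos hlt]
    · by_cases hgt : 2 * r > k
      · rw [if_neg (show ¬(k - r = r) by omega), if_neg (show ¬(r < k - r) by omega),
            if_neg hlt, if_pos hgt]
      · rw [if_pos (show k - r = r by omega), if_neg hlt, if_neg hgt]
        by_cases habs2 : (n - r + k).natAbs > (n - r).natAbs
        · rw [if_pos habs2, if_neg (show ¬((n - r).natAbs ≥ (n - r + k).natAbs) by omega)]
        · rw [if_neg habs2, if_pos (show (n - r).natAbs ≥ (n - r + k).natAbs by omega)]
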